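-- pv_equiv track=rewrite | github.com/sfc-gh-samaurer/Sam-Maurer-s-SnowWork-Skills-and-Files | skills/semantic-extraction-skill/modules/denodo/classifier.py | _count_case_nesting_depth
-- ===== SOURCE A (Python) =====
-- def _count_case_nesting_depth(sql: str) -> int:
--     """Return the maximum CASE...END nesting depth in *sql*.
--
--     Skips occurrences inside single- and double-quoted strings.
--     """
--     depth = max_depth = 0
--     in_single = in_double = False
--     i = 0
--     while i < len(sql):
--         ch = sql[i]
--         if ch == "'" and not in_double:
--             in_single = not in_single
--         elif ch == '"' and not in_single:
--             in_double = not in_double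
--         elif not in_single and not in_double:
--             upper4 = sql[i : i + 4].upper()
--             upper3 = sql[i : i + 3].upper()
--             pre_ok = i == 0 or not (sql[i - 1].isalnum() or sql[i - 1] == "_")
--             if upper4 == "CASE" and pre_ok:
--                 post = sql[i + 4] if i + 4 < len(sql) else " "
--                 if not (post.isalnum() or post == "_"):
--                     depth += 1
--                     max_depth = max(max_depth, depth)
--                     i += 4
--                     continue
--             elif upper3 == "END" and pre_ok:
--                 post = sql[i + 3] if i + 3 < len(sql) else " "
--                 if not (post.isalnum() or post == "_"):
--                     depth = max(0, depth - 1)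
--                     i += 3
--                     continue
--         i += 1
--     return max_depth
-- ===== SOURCE B (Python) =====
-- def _mask_quotes(sql):
--     """Replace every quoted span (quotes included) with spaces; a quote of one
--     kind inside the other kind is literal; an unterminated quote runs to EOS."""
--     out = []
--     q = None
--     for ch in sql:
--         if q is None:
--             if ch == "'" or ch == '"':
--                 q = ch
--                 out.append(" ")
--             else:
--                 out.append(ch)
--         else:
--             out.append(" ")
--             if ch == q:
--                 q = None
--     return "".join(out)
--
--
-- def _flush(tok, depth, max_depth):
--     u = tok.upper()
--     if u == "CASE":
--         depth += 1
--         if depth > max_depth: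
--             max_depth = depth
--     elif u == "END":
--         depth = max(0, depth - 1)
--     return depth, max_depth
--
--
-- def _count_case_nesting_depth(sql: str) -> int:
--     masked = _mask_quotes(sql)
--     depth = max_depth = 0
--     cur = ""
--     for ch in masked:
--         if ch.isalnum() or ch == "_":
--             cur += ch
--         else:
--             depth, max_depth = _flush(cur, depth, max_depth)
--             cur = ""
--     depth, max_depth = _flush(cur, depth, max_depth)
--     return max_depth
-- ===== Notes on version B (the rewrite author's own statement) =====
-- stated objective: alternative
-- what changed: Replaces A's single index-jumping scan (quote flags, 4/3-char lookahead with boundary checks, manual i+=4 skips) by a two-pass decomposition: first mask every quoted span with spaces, then fold over the maximal word tokens of the masked text, counting whole tokens equal to CASE/END.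
import Mathlib
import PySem

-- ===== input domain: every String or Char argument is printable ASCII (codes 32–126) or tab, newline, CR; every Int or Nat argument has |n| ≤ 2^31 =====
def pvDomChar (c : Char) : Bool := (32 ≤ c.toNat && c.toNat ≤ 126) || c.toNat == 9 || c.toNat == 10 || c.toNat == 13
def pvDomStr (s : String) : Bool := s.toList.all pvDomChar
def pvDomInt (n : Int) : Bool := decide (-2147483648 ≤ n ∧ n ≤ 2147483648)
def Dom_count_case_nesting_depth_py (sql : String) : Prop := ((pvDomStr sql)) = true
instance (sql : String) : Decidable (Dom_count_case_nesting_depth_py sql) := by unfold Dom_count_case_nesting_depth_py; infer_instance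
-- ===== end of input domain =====

-- B replaces A's single index-jumping scan by two passes — mask quoted spans with spaces,
-- then fold over maximal word tokens — same return value on every input (alternative decomposition).

-- Python's ch.isalnum() or ch == '_' (exact on the ASCII domain), used by both versions
def isWd (c : Char) : Bool := PySem.Chars.isalnum c || c = '_'

-- ===== PORT A =====
-- pre_ok: i == 0 (prev = none) or previous char not a word char
def aPreOk (prev : Option Char) : Bool :=
  match prev with
  | none => true
  | some p => !(isWd p)

-- the while-loop of A over the remaining suffix; prev carries sql[i-1]
def aLoop : List Char → Option Char → Bool → Bool → Int → Int → Int
  | [], _, _, _, _, maxd => maxd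
  | ch :: rest, prev, inS, inD, depth, maxd =>
    if ch = '\'' ∧ inD = false then aLoop rest (some ch) (!inS) inD depth maxd
    else if ch = '"' ∧ inS = false then aLoop rest (some ch) inS (!inD) depth maxd
    else if inS = false ∧ inD = false then
      if ((ch :: rest).take 4).map PySem.Chars.upperChar = ['C','A','S','E'] ∧ aPreOk prev = true then
        if isWd ((ch :: rest).getD 4 ' ') = false then
          aLoop ((ch :: rest).drop 4) ((ch :: rest)[3]?) inS inD (depth + 1) (max maxd (depth + 1))
        else aLoop rest (some ch) inS inD depth maxd
      else if ((ch :: rest).take 3).map PySem.Chars.upperChar = ['E','N','D'] ∧ aPreOk prev = true then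
        if isWd ((ch :: rest).getD 3 ' ') = false then
          aLoop ((ch :: rest).drop 3) ((ch :: rest)[2]?) inS inD (max 0 (depth - 1)) maxd
        else aLoop rest (some ch) inS inD depth maxd
      else aLoop rest (some ch) inS inD depth maxd
    else aLoop rest (some ch) inS inD depth maxd
  termination_by s => s.length
  decreasing_by all_goals (simp [List.length_drop]; try omega)

def count_case_nesting_depth_py (sql : String) : Int :=
  aLoop sql.toList none false false 0 0

-- ===== PORT B =====
-- pass 1: every quoted span (quotes included) becomes spaces
def maskQ : List Char → Option Char → List Char
  | [], _ => []
  | c :: rest, none =>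
    if c = '\'' ∨ c = '"' then ' ' :: maskQ rest (some c) else c :: maskQ rest none
  | c :: rest, some q => ' ' :: maskQ rest (if c = q then none else some q)

def flushTok (tok : List Char) (depth maxd : Int) : Int × Int :=
  let u := tok.map PySem.Chars.upperChar
  if u = ['C','A','S','E'] then (depth + 1, max maxd (depth + 1))
  else if u = ['E','N','D'] then (max 0 (depth - 1), maxd)
  else (depth, maxd)

-- pass 2: fold over the masked text, accumulating the current word token
def tokLoop : List Char → List Char → Int → Int → Int
  | [], cur, depth, maxd => (flushTok cur depth maxd).2
  | c :: rest, cur, depth, maxd =>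
    if isWd c then tokLoop rest (cur ++ [c]) depth maxd
    else tokLoop rest [] (flushTok cur depth maxd).1 (flushTok cur depth maxd).2

def count_case_nesting_depth_py_alt (sql : String) : Int :=
  tokLoop (maskQ sql.toList none) [] 0 0

-- ===== PRECONDITION & SPEC =====
def Spec_count_case_nesting_depth_py (sql : String) (out : Int) : Prop := out = count_case_nesting_depth_py_alt sql
instance (sql : String) (out : Int) : Decidable (Spec_count_case_nesting_depth_py sql out) := by unfold Spec_count_case_nesting_depth_py; infer_instance

-- ===== CLAIM (what is proved, stated in full; the proofs are below) =====
def Claim_equal_count_case_nesting_depth_py : Prop := ∀ (sql : String), Dom_count_case_nesting_depth_py sql → Spec_count_case_nesting_depth_py sql (count_case_nesting_depth_py sql)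

-- ===== LEMMAS AND PROOFS =====

theorem char_le_toNat {c d : Char} : (c ≤ d) ↔ c.toNat ≤ d.toNat := ge_iff_le

-- upper-casing a char does not change whether it is a word char
theorem isWd_upperChar (c : Char) : isWd (PySem.Chars.upperChar c) = isWd c := by
  unfold PySem.Chars.upperChar
  split
  · next h =>
    unfold PySem.Chars.islower at h
    simp only [Bool.and_eq_true, decide_eq_true_eq, char_le_toNat] at h
    have hlo : 97 ≤ c.toNat := h.1
    have hhi : c.toNat ≤ 122 := h.2
    have hv : (c.toNat - 32).isValidChar := by left; omega
    have ht : (Char.ofNat (c.toNat - 32)).toNat = c.toNat - 32 := by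
      rw [Char.toNat_ofNat]; simp [hv]
    have h95 : ('_' : Char).toNat = 95 := by decide
    unfold isWd PySem.Chars.isalnum PySem.Chars.isalpha PySem.Chars.isdigit PySem.Chars.isupper PySem.Chars.islower
    have hne : (Char.ofNat (c.toNat - 32) = '_') = False := by
      simp only [eq_iff_iff, iff_false]; intro he
      have := congrArg Char.toNat he; rw [ht, h95] at this; omega
    have hne2 : (c = '_') = False := by
      simp only [eq_iff_iff, iff_false]; intro he
      have := congrArg Char.toNat he; rw [h95] at this; omega
    simp only [char_le_toNat, ht, hne, hne2, decide_false, Bool.or_false]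
    have hA : ('A' : Char).toNat = 65 := by decide
    have hZ : ('Z' : Char).toNat = 90 := by decide
    have ha : ('a' : Char).toNat = 97 := by decide
    have hz : ('z' : Char).toNat = 122 := by decide
    have h0 : ('0' : Char).toNat = 48 := by decide
    have h9 : ('9' : Char).toNat = 57 := by decide
    rw [hA, hZ, ha, hz, h0, h9]
    have htr : ∀ a b : Bool, a = true → b = true → a = b := by decide
    apply htr
    · simp only [Bool.or_eq_true, Bool.and_eq_true, decide_eq_true_eq]; left; left; omega
    · simp only [Bool.or_eq_true, Bool.and_eq_true, decide_eq_true_eq]; left; right; omega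
  · rfl

theorem isWd_of_upper {c u : Char} (h : PySem.Chars.upperChar c = u) (hu : isWd u = true) : isWd c = true := by
  rw [← isWd_upperChar, h]; exact hu

theorem not_quote_of_wd {c : Char} (h : isWd c = true) : ¬(c = '\'' ∨ c = '"') := by
  rintro (rfl | rfl) <;> simp [isWd, PySem.Chars.isalnum, PySem.Chars.isalpha, PySem.Chars.isdigit,
    PySem.Chars.isupper, PySem.Chars.islower] at h

theorem dropWhile_head_false {p : Char → Bool} : ∀ (l : List Char) {c t}, l.dropWhile p = c :: t → p c = false := by
  intro l
  induction l with
  | nil => intro c t h; simp at h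
  | cons a l ih =>
    intro c t h
    by_cases hp : p a
    · rw [List.dropWhile_cons_of_pos hp] at h; exact ih h
    · rw [List.dropWhile_cons_of_neg hp] at h
      cases h; simpa using hp

-- A steps through interior word chars doing nothing (pre_ok is false there)
theorem skipWord : ∀ (w r : List Char) (p : Char) (d m : Int),
    (∀ c ∈ w, isWd c = true) → isWd p = true →
    aLoop (w ++ r) (some p) false false d m = aLoop r (some (w.getLastD p)) false false d m := by
  intro w
  induction w with
  | nil => intro r p d m _ _; rfl
  | cons c w ih =>
    intro r p d m hw hp
    have hc : isWd c = true := hw c (by simp)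
    have hnq := not_quote_of_wd hc
    have hpre : aPreOk (some p) = false := by simp [aPreOk, hp]
    rw [List.cons_append]
    rw [aLoop]
    rw [if_neg (by rintro ⟨rfl, -⟩; exact hnq (Or.inl rfl))]
    rw [if_neg (by rintro ⟨rfl, -⟩; exact hnq (Or.inr rfl))]
    rw [if_pos ⟨rfl, rfl⟩]
    rw [if_neg (by rintro ⟨-, h⟩; rw [hpre] at h; exact Bool.false_ne_true h)]
    rw [if_neg (by rintro ⟨-, h⟩; rw [hpre] at h; exact Bool.false_ne_true h)]
    rw [ih r c d m (fun x hx => hw x (by simp [hx])) hc]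
    simp [List.getLast?_cons]

theorem maskQ_words : ∀ (w r : List Char), (∀ c ∈ w, isWd c = true) →
    maskQ (w ++ r) none = w ++ maskQ r none := by
  intro w
  induction w with
  | nil => intro r _; rfl
  | cons c w ih =>
    intro r hw
    have hnq := not_quote_of_wd (hw c (by simp))
    rw [List.cons_append, maskQ, if_neg hnq, ih r (fun x hx => hw x (by simp [hx]))]
    rfl

theorem tokLoop_words : ∀ (w t cur : List Char) (d m : Int), (∀ c ∈ w, isWd c = true) →
    tokLoop (w ++ t) cur d m = tokLoop t (cur ++ w) d m := by
  intro w
  induction w with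
  | nil => intro t cur d m _; simp
  | cons c w ih =>
    intro t cur d m hw
    rw [List.cons_append, tokLoop, if_pos (hw c (by simp)),
      ih t (cur ++ [c]) d m (fun x hx => hw x (by simp [hx]))]
    simp

theorem tokLoop_flush_head : ∀ (L cur : List Char) (d m : Int),
    (L = [] ∨ ∃ c t, L = c :: t ∧ isWd c = false) →
    tokLoop L cur d m = tokLoop L [] (flushTok cur d m).1 (flushTok cur d m).2 := by
  intro L cur d m h
  rcases h with rfl | ⟨c, t, rfl, hc⟩
  · simp [tokLoop, flushTok]
  · rw [tokLoop, if_neg (by simp [hc]), tokLoop, if_neg (by simp [hc])]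
    simp [flushTok]

-- masked text whose first char exists is non-word when the source head is non-word
theorem maskQ_none_head (t : List Char) (h : isWd (t.getD 0 ' ') = false) :
    maskQ t none = [] ∨ ∃ c l, maskQ t none = c :: l ∧ isWd c = false := by
  cases t with
  | nil => left; rfl
  | cons c t =>
    right
    rw [maskQ]
    by_cases hq : c = '\'' ∨ c = '"'
    · exact ⟨' ', _, by rw [if_pos hq], by decide⟩
    · exact ⟨c, _, by rw [if_neg hq], by simpa using h⟩

theorem base_case (q : Option Char) (prev : Option Char) (inS inD : Bool) (d m : Int) :
    aLoop [] prev inS inD d m = tokLoop (maskQ [] q) [] d m := by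
  simp [aLoop, maskQ, tokLoop, flushTok]

-- the main simulation lemma
theorem mainSim : ∀ (n : Nat) (s : List Char), s.length ≤ n →
    ∀ (q : Option Char) (inS inD : Bool) (prev : Option Char) (d m : Int),
    ((q = none ∧ inS = false ∧ inD = false) ∨ (q = some '\'' ∧ inS = true ∧ inD = false) ∨
      (q = some '"' ∧ inS = false ∧ inD = true)) →
    (q = none → ∀ hd, s.head? = some hd → isWd hd = true → aPreOk prev = true) →
    aLoop s prev inS inD d m = tokLoop (maskQ s q) [] d m := by
  intro n
  induction n with
  | zero =>
    intro s hs q inS inD prev d m _ _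
    have : s = [] := List.eq_nil_of_length_eq_zero (Nat.le_zero.mp hs)
    subst this
    exact base_case q prev inS inD d m
  | succ n ih =>
    intro s hs q inS inD prev d m hq hpre
    cases s with
    | nil => exact base_case q prev inS inD d m
    | cons c rest =>
      have hrest : rest.length ≤ n := by simp at hs; omega
      have hsp : isWd ' ' = false := by decide
      rcases hq with ⟨rfl, rfl, rfl⟩ | ⟨rfl, rfl, rfl⟩ | ⟨rfl, rfl, rfl⟩
      · -- outside quotes
        by_cases hq1 : c = '\''
        · subst hq1
          rw [aLoop, if_pos ⟨rfl, rfl⟩, maskQ, if_pos (Or.inl rfl), tokLoop, if_neg (by simp [hsp])]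
          simp only [flushTok, List.map_nil, if_neg (by decide : ¬([] : List Char) = ['C','A','S','E']),
            if_neg (by decide : ¬([] : List Char) = ['E','N','D'])]
          exact ih rest hrest (some '\'') true false (some '\'') d m (Or.inr (Or.inl ⟨rfl, rfl, rfl⟩))
            (by intro h; exact absurd h (by simp))
        · by_cases hq2 : c = '"'
          · subst hq2
            rw [aLoop, if_neg (by rintro ⟨h, -⟩; exact hq1 h), if_pos ⟨rfl, rfl⟩, maskQ,
              if_pos (Or.inr rfl), tokLoop, if_neg (by simp [hsp])]
            simp only [flushTok, List.map_nil, if_neg (by decide : ¬([] : List Char) = ['C','A','S','E']),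
              if_neg (by decide : ¬([] : List Char) = ['E','N','D'])]
            exact ih rest hrest (some '"') false true (some '"') d m (Or.inr (Or.inr ⟨rfl, rfl, rfl⟩))
              (by intro h; exact absurd h (by simp))
          · -- c is not a quote
            have hnq : ¬(c = '\'' ∨ c = '"') := by rintro (h | h) <;> [exact hq1 h; exact hq2 h]
            by_cases hw : isWd c
            · -- c is a word char; pre_ok holds
              have hpok : aPreOk prev = true := hpre rfl c rfl hw
              by_cases hC : ((c :: rest).take 4).map PySem.Chars.upperChar = ['C','A','S','E'] ∧
                  isWd ((c :: rest).getD 4 ' ') = false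
              · -- a full CASE keyword starts here
                obtain ⟨hC4, hCpost⟩ := hC
                rcases rest with _ | ⟨c2, rest⟩; · simp at hC4
                rcases rest with _ | ⟨c3, rest⟩; · simp at hC4
                rcases rest with _ | ⟨c4, t⟩; · simp at hC4
                have hC4b := hC4
                simp only [List.take, List.map, List.cons.injEq, and_true] at hC4b
                obtain ⟨hu1, hu2, hu3, hu4⟩ := hC4b
                have hw2 : isWd c2 = true := isWd_of_upper hu2 (by decide)
                have hw3 : isWd c3 = true := isWd_of_upper hu3 (by decide)
                have hw4 : isWd c4 = true := isWd_of_upper hu4 (by decide)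
                have hCpost' : isWd (t.getD 0 ' ') = false := by simpa [List.getD] using hCpost
                -- A side
                rw [aLoop, if_neg (by rintro ⟨h, -⟩; exact hq1 h), if_neg (by rintro ⟨h, -⟩; exact hq2 h),
                  if_pos ⟨rfl, rfl⟩, if_pos ⟨hC4, hpok⟩, if_pos hCpost]
                simp only [List.drop_succ_cons, List.drop_zero, List.getElem?_cons_succ, List.getElem?_cons_zero]
                -- B side
                rw [show (c :: c2 :: c3 :: c4 :: t) = [c, c2, c3, c4] ++ t from rfl,
                  maskQ_words [c, c2, c3, c4] t (by intro x hx; simp at hx; rcases hx with rfl|rfl|rfl|rfl <;> assumption),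
                  tokLoop_words [c, c2, c3, c4] (maskQ t none) [] d m
                    (by intro x hx; simp at hx; rcases hx with rfl|rfl|rfl|rfl <;> assumption),
                  tokLoop_flush_head (maskQ t none) _ d m (maskQ_none_head t hCpost')]
                have hfl : flushTok ([] ++ [c, c2, c3, c4]) d m = (d + 1, max m (d + 1)) := by
                  simp [flushTok, hu1, hu2, hu3, hu4]
                rw [hfl]
                exact ih t (by simp at hs; omega) none false false (some c4) (d + 1) (max m (d + 1))
                  (Or.inl ⟨rfl, rfl, rfl⟩)
                  (by intro _ hd hhd hwd
                      cases t with
                      | nil => simp at hhd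
                      | cons c5 t' =>
                        exfalso
                        simp at hhd; subst hhd
                        simp [List.getD] at hCpost'
                        rw [hCpost'] at hwd; simp at hwd)
              · by_cases hE : ((c :: rest).take 3).map PySem.Chars.upperChar = ['E','N','D'] ∧
                    isWd ((c :: rest).getD 3 ' ') = false
                · -- a full END keyword starts here
                  obtain ⟨hE3, hEpost⟩ := hE
                  rcases rest with _ | ⟨c2, rest⟩; · simp at hE3
                  rcases rest with _ | ⟨c3, t⟩; · simp at hE3
                  have hE3b := hE3
                  simp only [List.take, List.map, List.cons.injEq, and_true] at hE3b
                  obtain ⟨hu1, hu2, hu3⟩ := hE3b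
                  have hw2 : isWd c2 = true := isWd_of_upper hu2 (by decide)
                  have hw3 : isWd c3 = true := isWd_of_upper hu3 (by decide)
                  have hEpost' : isWd (t.getD 0 ' ') = false := by simpa [List.getD] using hEpost
                  rw [aLoop, if_neg (by rintro ⟨h, -⟩; exact hq1 h), if_neg (by rintro ⟨h, -⟩; exact hq2 h),
                    if_pos ⟨rfl, rfl⟩,
                    if_neg (by
                      rintro ⟨h4, -⟩
                      simp only [List.take, List.map, List.cons.injEq] at h4
                      rw [hu1] at h4
                      exact absurd h4.1 (by decide)),
                    if_pos ⟨hE3, hpok⟩, if_pos hEpost]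
                  simp only [List.drop_succ_cons, List.drop_zero, List.getElem?_cons_succ, List.getElem?_cons_zero]
                  rw [show (c :: c2 :: c3 :: t) = [c, c2, c3] ++ t from rfl,
                    maskQ_words [c, c2, c3] t (by intro x hx; simp at hx; rcases hx with rfl|rfl|rfl <;> assumption),
                    tokLoop_words [c, c2, c3] (maskQ t none) [] d m
                      (by intro x hx; simp at hx; rcases hx with rfl|rfl|rfl <;> assumption),
                    tokLoop_flush_head (maskQ t none) _ d m (maskQ_none_head t hEpost')]
                  have hfl : flushTok ([] ++ [c, c2, c3]) d m = (max 0 (d - 1), m) := by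
                    simp [flushTok, hu1, hu2, hu3]
                  rw [hfl]
                  exact ih t (by simp at hs; omega) none false false (some c3) (max 0 (d - 1)) m
                    (Or.inl ⟨rfl, rfl, rfl⟩)
                    (by intro _ hd hhd hwd
                        cases t with
                        | nil => simp at hhd
                        | cons c5 t' =>
                          exfalso
                          simp at hhd; subst hhd
                          simp [List.getD] at hEpost'
                          rw [hEpost'] at hwd; simp at hwd)
                · -- no full keyword starts here: A steps one char, B accumulates the token
                  have hstep : aLoop (c :: rest) prev false false d m = aLoop rest (some c) false false d m := by
                    rw [aLoop, if_neg (by rintro ⟨h, -⟩; exact hq1 h), if_neg (by rintro ⟨h, -⟩; exact hq2 h),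
                      if_pos ⟨rfl, rfl⟩]
                    by_cases h4 : ((c :: rest).take 4).map PySem.Chars.upperChar = ['C','A','S','E'] ∧ aPreOk prev = true
                    · rw [if_pos h4, if_neg (by intro hpost; exact hC ⟨h4.1, hpost⟩)]
                    · rw [if_neg h4]
                      by_cases h3 : ((c :: rest).take 3).map PySem.Chars.upperChar = ['E','N','D'] ∧ aPreOk prev = true
                      · rw [if_pos h3, if_neg (by intro hpost; exact hE ⟨h3.1, hpost⟩)]
                      · rw [if_neg h3]
                  rw [hstep]
                  have hsplit : rest = rest.takeWhile isWd ++ rest.dropWhile isWd :=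
                    (List.takeWhile_append_dropWhile (p := isWd) (l := rest)).symm
                  have hwall : ∀ x ∈ rest.takeWhile isWd, isWd x = true := fun x hx => List.mem_takeWhile_imp hx
                  have hrpost : isWd ((rest.dropWhile isWd).getD 0 ' ') = false := by
                    cases hdw : rest.dropWhile isWd with
                    | nil => simpa [List.getD] using hsp
                    | cons a l => simpa [List.getD] using dropWhile_head_false rest hdw
                  conv_lhs => rw [hsplit]
                  rw [skipWord (rest.takeWhile isWd) (rest.dropWhile isWd) c d m hwall hw]
                  -- B side
                  have hcall : ∀ x ∈ c :: rest.takeWhile isWd, isWd x = true := by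
                    intro x hx
                    rcases List.mem_cons.mp hx with rfl | hx
                    · exact hw
                    · exact hwall x hx
                  conv_rhs => rw [show (c :: rest) = (c :: rest.takeWhile isWd) ++ rest.dropWhile isWd by rw [List.cons_append, ← hsplit]]
                  rw [maskQ_words _ _ hcall, tokLoop_words _ _ [] d m hcall,
                    tokLoop_flush_head _ _ d m (maskQ_none_head _ hrpost)]
                  have hfl : flushTok ([] ++ (c :: rest.takeWhile isWd)) d m = (d, m) := by
                    rw [List.nil_append]
                    have hne1 : ¬((c :: rest.takeWhile isWd).map PySem.Chars.upperChar = ['C','A','S','E']) := by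
                      intro hmap
                      apply hC
                      constructor
                      · have hlen : (c :: rest.takeWhile isWd).length = 4 := by
                          have := congrArg List.length hmap; simpa using this
                        have htake : (c :: rest).take 4 = c :: rest.takeWhile isWd := by
                          conv_lhs => rw [show (c :: rest) = (c :: rest.takeWhile isWd) ++ rest.dropWhile isWd by rw [List.cons_append, ← hsplit]]
                          rw [← hlen, List.take_left]
                        rw [htake, hmap]
                      · have hgd : (c :: rest).getD 4 ' ' = (rest.dropWhile isWd).getD 0 ' ' := by
                          conv_lhs => rw [show (c :: rest) = (c :: rest.takeWhile isWd) ++ rest.dropWhile isWd by rw [List.cons_append, ← hsplit]]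
                          have hlen : (c :: rest.takeWhile isWd).length = 4 := by
                            have := congrArg List.length hmap; simpa using this
                          rw [List.getD, List.getD, ← hlen, List.getElem?_append_right (le_refl _)]
                          simp
                        rw [hgd]; exact hrpost
                    have hne2 : ¬((c :: rest.takeWhile isWd).map PySem.Chars.upperChar = ['E','N','D']) := by
                      intro hmap
                      apply hE
                      constructor
                      · have hlen : (c :: rest.takeWhile isWd).length = 3 := by
                          have := congrArg List.length hmap; simpa using this
                        have htake : (c :: rest).take 3 = c :: rest.takeWhile isWd := by
                          conv_lhs => rw [show (c :: rest) = (c :: rest.takeWhile isWd) ++ rest.dropWhile isWd by rw [List.cons_append, ← hsplit]]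
                          rw [← hlen, List.take_left]
                        rw [htake, hmap]
                      · have hgd : (c :: rest).getD 3 ' ' = (rest.dropWhile isWd).getD 0 ' ' := by
                          conv_lhs => rw [show (c :: rest) = (c :: rest.takeWhile isWd) ++ rest.dropWhile isWd by rw [List.cons_append, ← hsplit]]
                          have hlen : (c :: rest.takeWhile isWd).length = 3 := by
                            have := congrArg List.length hmap; simpa using this
                          rw [List.getD, List.getD, ← hlen, List.getElem?_append_right (le_refl _)]
                          simp
                        rw [hgd]; exact hrpost
                    simp only [flushTok]
                    rw [if_neg hne1, if_neg hne2]
                  rw [hfl]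
                  exact ih (rest.dropWhile isWd)
                    (le_trans (by simpa using List.length_dropWhile_le (p := isWd) (l := rest)) hrest)
                    none false false (some ((rest.takeWhile isWd).getLastD c)) d m
                    (Or.inl ⟨rfl, rfl, rfl⟩)
                    (by intro _ hd hhd hwd
                        exfalso
                        cases hdw : rest.dropWhile isWd with
                        | nil => rw [hdw] at hhd; simp at hhd
                        | cons a l =>
                          rw [hdw] at hhd; simp at hhd; subst hhd
                          have := dropWhile_head_false rest hdw
                          rw [this] at hwd; simp at hwd)
            · -- c is a non-word, non-quote char
              rw [aLoop, if_neg (by rintro ⟨h, -⟩; exact hq1 h), if_neg (by rintro ⟨h, -⟩; exact hq2 h),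
                if_pos ⟨rfl, rfl⟩,
                if_neg (by
                  rintro ⟨h4, -⟩
                  have h1 : PySem.Chars.upperChar c = 'C' := by
                    simp [List.take, List.cons.injEq] at h4; exact h4.1
                  exact hw (isWd_of_upper h1 (by decide))),
                if_neg (by
                  rintro ⟨h3, -⟩
                  have h1 : PySem.Chars.upperChar c = 'E' := by
                    simp [List.take, List.cons.injEq] at h3; exact h3.1
                  exact hw (isWd_of_upper h1 (by decide)))]
              rw [maskQ, if_neg hnq, tokLoop, if_neg (by simpa using hw)]
              simp only [flushTok, List.map_nil, if_neg (by decide : ¬([] : List Char) = ['C','A','S','E']),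
                if_neg (by decide : ¬([] : List Char) = ['E','N','D'])]
              exact ih rest hrest none false false (some c) d m (Or.inl ⟨rfl, rfl, rfl⟩)
                (fun _ hd _ _ => by simp [aPreOk, hw])
      · -- inside single quotes
        by_cases hc : c = '\''
        · subst hc
          rw [aLoop, if_pos ⟨rfl, rfl⟩, maskQ]
          rw [if_pos rfl]
          rw [tokLoop, if_neg (by simp [hsp])]
          simp only [flushTok, List.map_nil, if_neg (by decide : ¬([] : List Char) = ['C','A','S','E']),
            if_neg (by decide : ¬([] : List Char) = ['E','N','D'])]
          exact ih rest hrest none false false (some '\'') d m (Or.inl ⟨rfl, rfl, rfl⟩)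
            (fun _ hd _ _ => by simp [aPreOk]; decide)
        · rw [aLoop, if_neg (by rintro ⟨h, -⟩; exact hc h),
            if_neg (by rintro ⟨-, h⟩; simp at h),
            if_neg (by rintro ⟨h, -⟩; simp at h), maskQ, if_neg hc]
          rw [tokLoop, if_neg (by simp [hsp])]
          simp only [flushTok, List.map_nil, if_neg (by decide : ¬([] : List Char) = ['C','A','S','E']),
            if_neg (by decide : ¬([] : List Char) = ['E','N','D'])]
          exact ih rest hrest (some '\'') true false (some c) d m (Or.inr (Or.inl ⟨rfl, rfl, rfl⟩))
            (by intro h; exact absurd h (by simp))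
      · -- inside double quotes
        by_cases hc : c = '"'
        · subst hc
          rw [aLoop, if_neg (by rintro ⟨-, h⟩; simp at h), if_pos ⟨rfl, rfl⟩, maskQ, if_pos rfl]
          rw [tokLoop, if_neg (by simp [hsp])]
          simp only [flushTok, List.map_nil, if_neg (by decide : ¬([] : List Char) = ['C','A','S','E']),
            if_neg (by decide : ¬([] : List Char) = ['E','N','D'])]
          exact ih rest hrest none false false (some '"') d m (Or.inl ⟨rfl, rfl, rfl⟩)
            (fun _ hd _ _ => by simp [aPreOk]; decide)
        · rw [aLoop, if_neg (by rintro ⟨-, h⟩; simp at h), if_neg (by rintro ⟨h, -⟩; exact hc h),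
            if_neg (by rintro ⟨-, h⟩; cases h), maskQ, if_neg hc]
          rw [tokLoop, if_neg (by simp [hsp])]
          simp only [flushTok, List.map_nil, if_neg (by decide : ¬([] : List Char) = ['C','A','S','E']),
            if_neg (by decide : ¬([] : List Char) = ['E','N','D'])]
          exact ih rest hrest (some '"') false true (some c) d m (Or.inr (Or.inr ⟨rfl, rfl, rfl⟩))
            (by intro h; exact absurd h (by simp))

-- ===== VERDICT (by name: the statement is the Claim_ definition above) =====
theorem count_case_nesting_depth_py_spec : Claim_equal_count_case_nesting_depth_py := by
  intro sql _
  unfold Spec_count_case_nesting_depth_py count_case_nesting_depth_py count_case_nesting_depth_py_alt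
  exact mainSim sql.toList.length sql.toList le_rfl none false false none 0 0 (Or.inl ⟨rfl, rfl, rfl⟩)
    (fun _ _ _ _ => rfl)
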